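-- pv_equiv track=rewrite | github.com/MatthewRBevins/Daily-Coding-Problems | 111-120/day114.py | modifiedSplit
-- ===== SOURCE A (Python) =====
-- def modifiedSplit(string, delimiters):
--     arr = []
--     arr2 = []
--     a = ""
--     a2 = ""
--     aa = False
--     for i in string:
--         if not i in delimiters:
--             if aa:
--                 arr2.append(a2)
--                 aa = False
--                 a2 = ""
--             a += i
--         else:
--             if not aa:
--                 arr.append(a)
--                 aa = True
--                 a = ""
--             a2 += i
--     if a != "":
--         arr.append(a)
--     if a2 != "":
--         arr2.append(a2)
--     arr.reverse()
--     return [arr,arr2]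
-- ===== SOURCE B (Python) =====
-- def modifiedSplit(string, delimiters):
--     tokens, delims = [], []
--     n = len(string)
--     i = 0
--     while i < n:
--         j = i
--         while j < n and string[j] not in delimiters:
--             j += 1
--         tokens.append(string[i:j])
--         i = j
--         if i < n:
--             k = i
--             while k < n and string[k] in delimiters:
--                 k += 1
--             delims.append(string[i:k])
--             i = k
--     tokens.reverse()
--     return [tokens, delims]
-- ===== Notes on version B (the rewrite author's own statement) =====
-- stated objective: alternative
-- what changed: Replaced A's char-by-char state machine (boolean in-delimiter flag, two growing string accumulators with deferred flushes) by a two-pointer run scanner that repeatedly takes a whole non-delimiter run and then a whole delimiter run and appends each slice at once.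
import Mathlib
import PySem

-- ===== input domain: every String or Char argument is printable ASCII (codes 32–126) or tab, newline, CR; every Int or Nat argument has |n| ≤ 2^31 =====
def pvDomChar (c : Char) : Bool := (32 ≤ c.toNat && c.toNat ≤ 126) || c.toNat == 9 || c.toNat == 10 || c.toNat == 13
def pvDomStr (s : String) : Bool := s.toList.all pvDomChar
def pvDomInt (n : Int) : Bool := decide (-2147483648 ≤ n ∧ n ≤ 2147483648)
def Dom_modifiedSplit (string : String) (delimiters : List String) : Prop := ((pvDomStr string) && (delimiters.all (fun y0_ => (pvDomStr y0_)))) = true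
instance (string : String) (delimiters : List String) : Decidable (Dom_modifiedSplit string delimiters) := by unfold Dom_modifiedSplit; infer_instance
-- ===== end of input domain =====

-- B replaces A's char-by-char boolean-flag state machine by a two-pointer run scanner that appends whole runs (alternative decomposition; same cost).


-- ===== PORT A =====
-- Python's `i in delimiters` for a character i of the string: the one-char string equals some delimiter
def msIsDelim (delimiters : List String) (c : Char) : Bool := delimiters.contains (String.mk [c])

-- loop state (arr, arr2, a, a2, aa); strings accumulated as List Char, turned into String at the end
def msState : Type := List (List Char) × List (List Char) × List Char × List Char × Bool

def msStep (delimiters : List String) (st : msState) (c : Char) : msState :=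
  match st with
  | (arr, arr2, a, a2, aa) =>
    if !(msIsDelim delimiters c) then
      if aa then (arr, arr2 ++ [a2], a ++ [c], ([] : List Char), false)
      else (arr, arr2, a ++ [c], a2, aa)
    else
      if !aa then (arr ++ [a], arr2, ([] : List Char), a2 ++ [c], true)
      else (arr, arr2, a, a2 ++ [c], true)

-- the two `if a != ""` / `if a2 != ""` flushes after the loop
def msFinish (st : msState) : List (List Char) × List (List Char) :=
  match st with
  | (arr, arr2, a, a2, _) =>
    ((if a = [] then arr else arr ++ [a]), (if a2 = [] then arr2 else arr2 ++ [a2]))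

def modifiedSplit (string : String) (delimiters : List String) : List (List String) :=
  let p := msFinish (string.toList.foldl (msStep delimiters) ([], [], [], [], false))
  [p.1.reverse.map String.mk, p.2.map String.mk]

-- ===== PORT B =====
-- two-pointer run scanner: inner `while` loops become takeWhile/dropWhile over the remaining chars
def msGo (delimiters : List String) : List Char → List (List Char) × List (List Char)
  | [] => ([], [])
  | c :: cs =>
    let tok := (c :: cs).takeWhile (fun x => !(msIsDelim delimiters x))
    match h : (c :: cs).dropWhile (fun x => !(msIsDelim delimiters x)) with
    | [] => ([tok], [])
    | r :: rs =>
      let d := r :: rs.takeWhile (msIsDelim delimiters)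
      let p := msGo delimiters (rs.dropWhile (msIsDelim delimiters))
      (tok :: p.1, d :: p.2)
  termination_by cs => cs.length
  decreasing_by
    have h1 : (r :: rs).length ≤ (c :: cs).length := h ▸ List.length_dropWhile_le _ _
    have h2 : (rs.dropWhile (msIsDelim delimiters)).length ≤ rs.length :=
      List.length_dropWhile_le _ _
    simp at h1 ⊢; omega

def modifiedSplit_alt (string : String) (delimiters : List String) : List (List String) :=
  let p := msGo delimiters string.toList
  [p.1.reverse.map String.mk, p.2.map String.mk]

-- ===== PRECONDITION & SPEC =====
def Spec_modifiedSplit (string : String) (delimiters : List String) (out : List (List String)) : Prop := out = modifiedSplit_alt string delimiters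
instance (string : String) (delimiters : List String) (out : List (List String)) : Decidable (Spec_modifiedSplit string delimiters out) := by unfold Spec_modifiedSplit; infer_instance

-- ===== CLAIM (what is proved, stated in full; the proofs are below) =====
def Claim_equal_modifiedSplit : Prop := ∀ (string : String) (delimiters : List String), Dom_modifiedSplit string delimiters → Spec_modifiedSplit string delimiters (modifiedSplit string delimiters)

-- ===== LEMMAS AND PROOFS =====

-- head of the dropWhile residue fails the predicate
theorem ms_dropWhile_head {α : Type} (p : α → Bool) :
    ∀ (l : List α) {r : α} {rs : List α}, l.dropWhile p = r :: rs → p r = false := by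
  intro l
  induction l with
  | nil => intro r rs h; simp [List.dropWhile] at h
  | cons x xs ih =>
    intro r rs h
    by_cases hx : p x
    · exact ih (by simpa [List.dropWhile, hx] using h)
    · simp [List.dropWhile, hx] at h
      rw [← h.1]; exact Bool.eq_false_iff.mpr hx

-- A's loop across a maximal token run (state in token mode, a2 = [], aa = false)
theorem msL1 (delimiters : List String) :
    ∀ (cs : List Char) (arr arr2 : List (List Char)) (a : List Char),
    cs.foldl (msStep delimiters) (arr, arr2, a, ([] : List Char), false) =
      (if (cs.dropWhile (fun x => !(msIsDelim delimiters x))) = [] then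
        (arr, arr2, a ++ cs.takeWhile (fun x => !(msIsDelim delimiters x)), ([] : List Char), false)
      else
        (cs.dropWhile (fun x => !(msIsDelim delimiters x))).foldl (msStep delimiters)
          (arr ++ [a ++ cs.takeWhile (fun x => !(msIsDelim delimiters x))], arr2,
            ([] : List Char), ([] : List Char), true)) := by
  intro cs
  induction cs with
  | nil => intro arr arr2 a; simp
  | cons c cs ih =>
    intro arr arr2 a
    by_cases hc : msIsDelim delimiters c
    · -- c is a delimiter: both sides take one identical step into delim mode
      have hstep : msStep delimiters (arr, arr2, a, ([] : List Char), false) c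
          = (arr ++ [a], arr2, ([] : List Char), [c], true) := by simp [msStep, hc]
      have hstep2 : msStep delimiters (arr ++ [a], arr2, ([] : List Char), ([] : List Char), true) c
          = (arr ++ [a], arr2, ([] : List Char), [c], true) := by simp [msStep, hc]
      rw [List.foldl_cons, hstep, List.dropWhile_cons, List.takeWhile_cons]
      simp only [hc, Bool.not_true, Bool.false_eq_true, if_false, reduceCtorEq,
        List.takeWhile_nil, List.append_nil]
      rw [List.foldl_cons, hstep2]
      rfl
    · rw [List.foldl_cons]
      have hstep : msStep delimiters (arr, arr2, a, ([] : List Char), false) c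
          = (arr, arr2, a ++ [c], ([] : List Char), false) := by simp [msStep, hc]
      rw [hstep, ih]
      simp [List.takeWhile_cons, hc]

-- A's loop across a maximal delimiter run (state in delim mode, a = [], aa = true)
theorem msL2 (delimiters : List String) :
    ∀ (cs : List Char) (arr arr2 : List (List Char)) (a2 : List Char),
    cs.foldl (msStep delimiters) (arr, arr2, ([] : List Char), a2, true) =
      (if (cs.dropWhile (msIsDelim delimiters)) = [] then
        (arr, arr2, ([] : List Char), a2 ++ cs.takeWhile (msIsDelim delimiters), true)
      else
        (cs.dropWhile (msIsDelim delimiters)).foldl (msStep delimiters)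
          (arr, arr2 ++ [a2 ++ cs.takeWhile (msIsDelim delimiters)],
            ([] : List Char), ([] : List Char), false)) := by
  intro cs
  induction cs with
  | nil => intro arr arr2 a2; simp
  | cons c cs ih =>
    intro arr arr2 a2
    by_cases hc : msIsDelim delimiters c
    · rw [List.foldl_cons]
      have hstep : msStep delimiters (arr, arr2, ([] : List Char), a2, true) c
          = (arr, arr2, ([] : List Char), a2 ++ [c], true) := by simp [msStep, hc]
      rw [hstep, ih]
      simp [List.takeWhile_cons, hc]
    · -- c is not a delimiter: both sides take one identical step back into token mode
      have hstep : msStep delimiters (arr, arr2, ([] : List Char), a2, true) c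
          = (arr, arr2 ++ [a2], [c], ([] : List Char), false) := by simp [msStep, hc]
      have hstep2 : msStep delimiters (arr, arr2 ++ [a2], ([] : List Char), ([] : List Char), false) c
          = (arr, arr2 ++ [a2], [c], ([] : List Char), false) := by simp [msStep, hc]
      rw [List.foldl_cons, hstep, List.dropWhile_cons, List.takeWhile_cons]
      simp only [hc, Bool.false_eq_true, if_false, reduceCtorEq, List.append_nil]
      rw [List.foldl_cons, hstep2]
      rfl

-- merge a pending token prefix a into B's token list
def msToks (a : List Char) (ts : List (List Char)) : List (List Char) :=
  match ts with
  | [] => if a = [] then [] else [a]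
  | t :: ts => (a ++ t) :: ts

-- one-step characterisations of msGo on a nonempty list
theorem msGo_stop (delimiters : List String) (c : Char) (cs : List Char)
    (hd : (c :: cs).dropWhile (fun x => !(msIsDelim delimiters x)) = []) :
    msGo delimiters (c :: cs) = ([(c :: cs).takeWhile (fun x => !(msIsDelim delimiters x))], []) := by
  simp only [msGo]
  split
  · rfl
  · rename_i r rs h; rw [hd] at h; exact absurd h (by simp)

theorem msGo_step (delimiters : List String) (c : Char) (cs : List Char) (r : Char) (rs : List Char)
    (hd : (c :: cs).dropWhile (fun x => !(msIsDelim delimiters x)) = r :: rs) :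
    msGo delimiters (c :: cs) =
      ((c :: cs).takeWhile (fun x => !(msIsDelim delimiters x)) ::
          (msGo delimiters (rs.dropWhile (msIsDelim delimiters))).1,
        (r :: rs.takeWhile (msIsDelim delimiters)) ::
          (msGo delimiters (rs.dropWhile (msIsDelim delimiters))).2) := by
  simp only [msGo]
  split
  · rename_i h; rw [hd] at h; exact absurd h (by simp)
  · rename_i r' rs' h
    rw [hd] at h
    obtain ⟨rfl, rfl⟩ : r' = r ∧ rs' = rs := by
      constructor <;> [exact (List.cons.injEq .. ▸ h).1.symm ▸ rfl; exact ((List.cons.injEq ..).mp h.symm).2]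
    rfl

-- main invariant: A finished from token mode = B's runs, with prefix a merged
theorem msMain (delimiters : List String) :
    ∀ (n : Nat) (cs : List Char), cs.length ≤ n →
    ∀ (arr arr2 : List (List Char)) (a : List Char),
    msFinish (cs.foldl (msStep delimiters) (arr, arr2, a, ([] : List Char), false)) =
      (arr ++ msToks a (msGo delimiters cs).1, arr2 ++ (msGo delimiters cs).2) := by
  intro n
  induction n with
  | zero =>
    intro cs hcs arr arr2 a
    have hcs0 : cs = [] := List.eq_nil_of_length_eq_zero (Nat.le_zero.mp hcs)
    subst hcs0
    by_cases ha : a = [] <;> simp [msGo, msToks, msFinish, ha]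
  | succ n ihn =>
    intro cs hcs arr arr2 a
    rw [msL1, ]
    cases hd : cs.dropWhile (fun x => !(msIsDelim delimiters x)) with
    | nil =>
      rw [if_pos rfl]
      have htw : cs.takeWhile (fun x => !(msIsDelim delimiters x)) = cs := by
        conv_rhs => rw [← List.takeWhile_append_dropWhile
          (p := fun x => !(msIsDelim delimiters x)) (l := cs)]
        rw [hd, List.append_nil]
      cases cs with
      | nil => by_cases ha : a = [] <;> simp [msGo, msToks, msFinish, ha]
      | cons c cs' =>
        rw [htw]
        have hne : a ++ c :: cs' ≠ [] := by simp
        rw [msGo_stop delimiters c cs' hd, htw]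
        simp [msFinish, msToks, hne]
    | cons r rs =>
      rw [if_neg (by simp [hd])]
      have hr : msIsDelim delimiters r = true := by
        have := ms_dropWhile_head (fun x => !(msIsDelim delimiters x)) cs hd
        simpa using this
      refine (congrArg msFinish (msL2 delimiters (r :: rs)
        (arr ++ [a ++ cs.takeWhile (fun x => !(msIsDelim delimiters x))]) arr2 [])).trans ?_
      have hdd : (r :: rs).dropWhile (msIsDelim delimiters) = rs.dropWhile (msIsDelim delimiters) := by
        simp [List.dropWhile_cons, hr]
      have hdt : (r :: rs).takeWhile (msIsDelim delimiters) = r :: rs.takeWhile (msIsDelim delimiters) := by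
        simp [List.takeWhile_cons, hr]
      cases cs with
      | nil => simp [List.dropWhile] at hd
      | cons c cs' =>
        cases hd2 : rs.dropWhile (msIsDelim delimiters) with
        | nil =>
          rw [hdd, hd2, if_pos rfl]
          rw [msGo_step delimiters c cs' r rs hd, hd2]
          simp [msFinish, msToks, msGo, hdt]
        | cons x xs =>
          rw [hdd, hd2, if_neg (by simp)]
          have hlen : (x :: xs).length ≤ n := by
            have h1 : (r :: rs).length ≤ (c :: cs').length := by
              rw [← hd]; exact List.length_dropWhile_le _ _
            have h2 : (rs.dropWhile (msIsDelim delimiters)).length ≤ rs.length :=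
              List.length_dropWhile_le _ _
            rw [hd2] at h2
            simp at h1 h2 hcs ⊢
            omega
          refine (ihn (x :: xs) hlen _ _ []).trans ?_
          have hgo1 : msToks [] (msGo delimiters (x :: xs)).1 = (msGo delimiters (x :: xs)).1 := by
            simp only [msGo]
            cases hxx : (x :: xs).dropWhile (fun y => !(msIsDelim delimiters y)) <;> simp [msToks]
          rw [hgo1]
          rw [msGo_step delimiters c cs' r rs hd, hd2]
          simp [msToks, hdt]


-- pending empty prefix merges trivially into B's token list
theorem msToks_nil (delimiters : List String) (cs : List Char) :
    msToks [] (msGo delimiters cs).1 = (msGo delimiters cs).1 := by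
  cases cs with
  | nil => simp [msGo, msToks]
  | cons c cs =>
    cases hd : (c :: cs).dropWhile (fun x => !(msIsDelim delimiters x)) with
    | nil => rw [msGo_stop delimiters c cs hd]; simp [msToks]
    | cons r rs => rw [msGo_step delimiters c cs r rs hd]; simp [msToks]

-- ===== VERDICT (by name: the statement is the Claim_ definition above) =====
theorem modifiedSplit_spec : Claim_equal_modifiedSplit := by
  intro s delimiters _
  show modifiedSplit s delimiters = modifiedSplit_alt s delimiters
  have h : msFinish (s.toList.foldl (msStep delimiters) ([], [], [], [], false))
      = msGo delimiters s.toList := by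
    have h0 := msMain delimiters s.toList.length s.toList le_rfl [] [] []
    rw [h0, msToks_nil]
    simp
  exact congrArg (fun p => [p.1.reverse.map String.mk, p.2.map String.mk]) h
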